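-- pv_equiv track=rewrite | github.com/wleng2001/ECM-External_Computer_Monitor | COMPUTER_PROGRAM.py | load_sign
-- ===== SOURCE A (Python) =====
-- def load_sign(width,last_position):
--     empty='-'
--     busy='>>>'
--     text=''
--     if_busy_is=False
--     for i in range(width-len(busy)+1):
--         if last_position==i-1 and if_busy_is==False:
--             text+=busy
--             last_position=i
--             if_busy_is=True
--         else:
--             text+=empty
--
--     if last_position >= width-len(busy):
--         last_position=-1
--
--     return text, last_position
-- ===== SOURCE B (Python) =====
-- def load_sign(width, last_position):
--     pos = last_position + 1
--     if 0 <= pos <= width - 3: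
--         chars = ['-'] * pos + ['>', '>', '>'] + ['-'] * (width - 3 - pos)
--         last_position = pos
--     else:
--         chars = ['-'] * max(0, width - 2)
--     if last_position >= width - 3:
--         last_position = -1
--     return ''.join(chars), last_position
-- ===== Notes on version B (the rewrite author's own statement) =====
-- stated objective: simpler
-- what changed: Replaces A's stateful per-character loop (marker flag, rolling last_position) with direct arithmetic construction: compute the marker position once and assemble the string from two replicated dash runs around the marker.
import Mathlib
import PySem

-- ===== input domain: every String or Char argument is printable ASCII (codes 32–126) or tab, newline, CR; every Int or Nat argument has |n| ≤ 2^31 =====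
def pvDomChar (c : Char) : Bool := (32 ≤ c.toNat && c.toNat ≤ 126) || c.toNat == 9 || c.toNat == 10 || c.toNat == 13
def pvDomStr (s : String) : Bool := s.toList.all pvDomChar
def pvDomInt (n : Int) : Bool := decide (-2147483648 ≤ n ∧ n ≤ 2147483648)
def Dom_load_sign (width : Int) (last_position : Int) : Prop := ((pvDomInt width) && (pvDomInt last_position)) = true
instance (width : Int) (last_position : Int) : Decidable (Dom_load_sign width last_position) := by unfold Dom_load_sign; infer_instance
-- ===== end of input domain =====

-- B replaces A's stateful character-by-character loop by direct arithmetic string construction (simpler).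

-- ===== PORT A =====
-- text is built as a List Char (Python str concatenation), wrapped into String at the end.
def load_sign (width : Int) (last_position : Int) : String × Int :=
  let empty : List Char := ['-']
  let busy : List Char := ['>', '>', '>']
  let st :=
    (PySem.List.pyRange 0 (width - 3 + 1) 1).foldl
      (fun (st : List Char × Int × Bool) i =>
        if st.2.1 = i - 1 ∧ st.2.2 = false then (st.1 ++ busy, i, true)
        else (st.1 ++ empty, st.2.1, st.2.2))
      ([], last_position, false)
  let lp := if st.2.1 ≥ width - 3 then -1 else st.2.1
  (String.ofList st.1, lp)

-- ===== PORT B =====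
-- '-' * n (n possibly ≤ 0 gives '') is List.replicate n.toNat '-' — exact, since toNat clamps negatives to 0.
def load_sign_alt (width : Int) (last_position : Int) : String × Int :=
  let pos := last_position + 1
  if 0 ≤ pos ∧ pos ≤ width - 3 then
    (String.ofList (List.replicate pos.toNat '-' ++ ['>', '>', '>'] ++
                List.replicate (width - 3 - pos).toNat '-'),
     if pos ≥ width - 3 then -1 else pos)
  else
    (String.ofList (List.replicate (max 0 (width - 2)).toNat '-'),
     if last_position ≥ width - 3 then -1 else last_position)

-- ===== PRECONDITION & SPEC =====
def Spec_load_sign (width : Int) (last_position : Int) (out : String × Int) : Prop := out = load_sign_alt width last_position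
instance (width : Int) (last_position : Int) (out : String × Int) : Decidable (Spec_load_sign width last_position out) := by unfold Spec_load_sign; infer_instance

-- ===== CLAIM (what is proved, stated in full; the proofs are below) =====
def Claim_equal_load_sign : Prop := ∀ (width : Int) (last_position : Int), Dom_load_sign width last_position → Spec_load_sign width last_position (load_sign width last_position)

-- ===== LEMMAS AND PROOFS =====

-- Characterisation of A's loop over range(0, n): either the marker got placed (at lp+1) or n dashes.
theorem load_sign_loop (n : Nat) (lp : Int) :
    (PySem.List.pyRange 0 (n : Int) 1).foldl
      (fun (st : List Char × Int × Bool) i =>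
        if st.2.1 = i - 1 ∧ st.2.2 = false then (st.1 ++ ['>', '>', '>'], i, true)
        else (st.1 ++ ['-'], st.2.1, st.2.2))
      ([], lp, false)
    = if 0 ≤ lp + 1 ∧ lp + 1 < (n : Int) then
        (List.replicate (lp + 1).toNat '-' ++ ['>', '>', '>'] ++
           List.replicate (n - 1 - (lp + 1).toNat) '-', lp + 1, true)
      else (List.replicate n '-', lp, false) := by
  induction n with
  | zero =>
      simp [PySem.List.pyRange_one_eq_nil]
  | succ n ih =>
      have hsplit : PySem.List.pyRange 0 ((n : Int) + 1) 1
          = PySem.List.pyRange 0 (n : Int) 1 ++ [(n : Int)] := by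
        exact PySem.List.pyRange_one_succ_right (by exact_mod_cast Nat.zero_le n)
      push_cast
      rw [hsplit, List.foldl_append, ih]
      by_cases h1 : 0 ≤ lp + 1 ∧ lp + 1 < (n : Int)
      · have h2 : 0 ≤ lp + 1 ∧ lp + 1 < (n : Int) + 1 := ⟨h1.1, by omega⟩
        rw [if_pos h1, if_pos h2]
        simp only [List.foldl_cons, List.foldl_nil]
        rw [if_neg (by simp)]
        refine Prod.ext ?_ rfl
        show List.replicate (lp + 1).toNat '-' ++ ['>', '>', '>'] ++
            List.replicate (n - 1 - (lp + 1).toNat) '-' ++ ['-'] = _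
        rw [List.append_assoc, List.append_assoc, ← List.replicate_succ' ]
        simp only [List.append_assoc]
        congr 2
        congr 1
        omega
      · by_cases h2 : 0 ≤ lp + 1 ∧ lp + 1 < (n : Int) + 1
        · have hn : lp = (n : Int) - 1 := by omega
          rw [if_neg h1, if_pos h2]
          simp only [List.foldl_cons, List.foldl_nil]
          rw [if_pos ⟨hn, by trivial⟩]
          refine Prod.ext ?_ (by simp; omega)
          show List.replicate n '-' ++ ['>', '>', '>'] = _
          have hp : (lp + 1).toNat = n := by omega
          rw [hp]
          simp
        · rw [if_neg h1, if_neg h2]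
          simp only [List.foldl_cons, List.foldl_nil]
          rw [if_neg (by rintro ⟨h, -⟩; omega)]
          refine Prod.ext ?_ rfl
          show List.replicate n '-' ++ ['-'] = _
          rw [← List.replicate_succ']

-- ===== VERDICT (by name: the statement is the Claim_ definition above) =====
theorem load_sign_spec : Claim_equal_load_sign := by
  unfold Claim_equal_load_sign Spec_load_sign
  intro width lp _
  unfold load_sign load_sign_alt
  dsimp only
  by_cases hw : width - 2 ≤ 0
  · rw [show width - 3 + 1 = width - 2 by ring, PySem.List.pyRange_one_eq_nil hw]
    rw [if_neg (show ¬ (0 ≤ lp + 1 ∧ lp + 1 ≤ width - 3) by omega)]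
    simp only [List.foldl_nil]
    rw [show (max 0 (width - 2)).toNat = 0 by omega]
    rfl
  · rw [show width - 3 + 1 = ((width - 2).toNat : Int) by omega, load_sign_loop]
    by_cases h : 0 ≤ lp + 1 ∧ lp + 1 < ((width - 2).toNat : Int)
    · rw [if_pos h, if_pos (show 0 ≤ lp + 1 ∧ lp + 1 ≤ width - 3 from ⟨h.1, by omega⟩)]
      rw [show (width - 2).toNat - 1 - (lp + 1).toNat = (width - 3 - (lp + 1)).toNat by omega]
    · rw [if_neg h, if_neg (show ¬ (0 ≤ lp + 1 ∧ lp + 1 ≤ width - 3) by omega)]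
      rw [show (max 0 (width - 2)).toNat = (width - 2).toNat by omega]
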